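-- pv_equiv track=rewrite | github.com/Devorvant/bybit-strategy-lab | app/trading/chart_service.py | _build_live_summary
-- ===== SOURCE A (Python) =====
-- from typing import Any
--
-- LIVE_ENTRY_KINDS = {"manual_long", "manual_short", "auto_long", "auto_short"}
--
-- LIVE_CLOSE_KINDS = {"manual_close", "auto_close", "exchange_external_close", "exchange_tp_sl_close"}
--
-- def _build_live_summary(events: list[dict[str, Any]]) -> dict[str, Any]:
--     kinds = [e.get("kind") for e in events]
--     return {
--         "events_total": len(events),
--         "manual_count": sum(1 for k in kinds if isinstance(k, str) and k.startswith("manual_")),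
--         "auto_count": sum(1 for k in kinds if isinstance(k, str) and k.startswith("auto_")),
--         "external_close_count": sum(1 for k in kinds if k == "exchange_external_close"),
--         "tp_sl_close_count": sum(1 for k in kinds if k == "exchange_tp_sl_close"),
--         "opens_count": sum(1 for k in kinds if k in LIVE_ENTRY_KINDS),
--         "closes_count": sum(1 for k in kinds if k in LIVE_CLOSE_KINDS),
--     }
-- ===== SOURCE B (Python) =====
-- from typing import Any
--
-- LIVE_ENTRY_KINDS = {"manual_long", "manual_short", "auto_long", "auto_short"}
--
-- LIVE_CLOSE_KINDS = {"manual_close", "auto_close", "exchange_external_close", "exchange_tp_sl_close"}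
--
-- def _build_live_summary(events: list[dict[str, Any]]) -> dict[str, Any]:
--     manual = auto = external = tpsl = opens = closes = 0
--     for e in events:
--         k = e.get("kind")
--         if isinstance(k, str):
--             if k.startswith("manual_"):
--                 manual += 1
--             if k.startswith("auto_"):
--                 auto += 1
--             if k == "exchange_external_close":
--                 external += 1
--             if k == "exchange_tp_sl_close":
--                 tpsl += 1
--             if k in LIVE_ENTRY_KINDS:
--                 opens += 1
--             if k in LIVE_CLOSE_KINDS:
--                 closes += 1
--     return {
--         "events_total": len(events),
--         "manual_count": manual,
--         "auto_count": auto,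
--         "external_close_count": external,
--         "tp_sl_close_count": tpsl,
--         "opens_count": opens,
--         "closes_count": closes,
--     }
-- ===== Notes on version B (the rewrite author's own statement) =====
-- stated objective: alternative
-- what changed: Replaced seven independent comprehension passes over the kinds list with one foldl-style loop over events that maintains all six counters at once.
import Mathlib
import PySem

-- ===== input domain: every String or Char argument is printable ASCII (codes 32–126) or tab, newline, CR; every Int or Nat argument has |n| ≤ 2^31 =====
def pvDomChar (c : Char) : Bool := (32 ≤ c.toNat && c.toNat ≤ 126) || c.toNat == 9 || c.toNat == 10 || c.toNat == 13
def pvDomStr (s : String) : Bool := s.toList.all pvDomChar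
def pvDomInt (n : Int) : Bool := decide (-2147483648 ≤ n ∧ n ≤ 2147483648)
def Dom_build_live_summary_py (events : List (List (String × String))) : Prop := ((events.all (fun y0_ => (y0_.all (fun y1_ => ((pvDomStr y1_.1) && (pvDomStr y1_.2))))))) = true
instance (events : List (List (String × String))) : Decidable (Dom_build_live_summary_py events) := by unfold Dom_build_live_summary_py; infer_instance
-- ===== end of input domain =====

-- B replaces A's seven independent passes over the kinds list by one loop maintaining all counters (objective: alternative decomposition).

-- shared helper: e.get("kind") — first-match association-list lookup (dict keys are unique in Python, so first match is exact)
def getKind : List (String × String) → Option String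
  | [] => none
  | (k, v) :: rest => if k == "kind" then some v else getKind rest

-- the category predicates (used as written by both programs)
def isManualKind : Option String → Bool
  | some s => PySem.Str.startswith s "manual_"
  | none => false

def isAutoKind : Option String → Bool
  | some s => PySem.Str.startswith s "auto_"
  | none => false

def isExternalClose (k : Option String) : Bool := k == some "exchange_external_close"

def isTpSlClose (k : Option String) : Bool := k == some "exchange_tp_sl_close"

def isEntryKind (k : Option String) : Bool :=
  k == some "manual_long" || k == some "manual_short" || k == some "auto_long" || k == some "auto_short"

def isCloseKind (k : Option String) : Bool :=
  k == some "manual_close" || k == some "auto_close" || k == some "exchange_external_close" || k == some "exchange_tp_sl_close"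

-- ===== PORT A =====
-- A: builds the kinds list, then seven independent counting passes
def build_live_summary_py (events : List (List (String × String))) : List (String × Int) :=
  let kinds := events.map getKind
  [("events_total", (events.length : Int)),
   ("manual_count", (kinds.countP isManualKind : Int)),
   ("auto_count", (kinds.countP isAutoKind : Int)),
   ("external_close_count", (kinds.countP isExternalClose : Int)),
   ("tp_sl_close_count", (kinds.countP isTpSlClose : Int)),
   ("opens_count", (kinds.countP isEntryKind : Int)),
   ("closes_count", (kinds.countP isCloseKind : Int))]

-- ===== PORT B =====
structure LiveCounters where
  manual : Int
  auto : Int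
  external : Int
  tpsl : Int
  opens : Int
  closes : Int
deriving DecidableEq, Repr

def bStep (c : LiveCounters) (e : List (String × String)) : LiveCounters :=
  let k := getKind e
  { manual := if isManualKind k then c.manual + 1 else c.manual
    auto := if isAutoKind k then c.auto + 1 else c.auto
    external := if isExternalClose k then c.external + 1 else c.external
    tpsl := if isTpSlClose k then c.tpsl + 1 else c.tpsl
    opens := if isEntryKind k then c.opens + 1 else c.opens
    closes := if isCloseKind k then c.closes + 1 else c.closes }

def build_live_summary_py_alt (events : List (List (String × String))) : List (String × Int) :=
  let c := events.foldl bStep ⟨0, 0, 0, 0, 0, 0⟩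
  [("events_total", (events.length : Int)),
   ("manual_count", c.manual),
   ("auto_count", c.auto),
   ("external_close_count", c.external),
   ("tp_sl_close_count", c.tpsl),
   ("opens_count", c.opens),
   ("closes_count", c.closes)]

-- ===== PRECONDITION & SPEC =====
def Spec_build_live_summary_py (events : List (List (String × String))) (out : List (String × Int)) : Prop := out = build_live_summary_py_alt events
instance (events : List (List (String × String))) (out : List (String × Int)) : Decidable (Spec_build_live_summary_py events out) := by unfold Spec_build_live_summary_py; infer_instance

-- ===== CLAIM (what is proved, stated in full; the proofs are below) =====
def Claim_equal_build_live_summary_py : Prop := ∀ (events : List (List (String × String))), Dom_build_live_summary_py events → Spec_build_live_summary_py events (build_live_summary_py events)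

-- ===== LEMMAS AND PROOFS =====

theorem bStep_foldl (l : List (List (String × String))) :
    ∀ c : LiveCounters, l.foldl bStep c =
      { manual := c.manual + (l.countP (fun e => isManualKind (getKind e)) : Int)
        auto := c.auto + (l.countP (fun e => isAutoKind (getKind e)) : Int)
        external := c.external + (l.countP (fun e => isExternalClose (getKind e)) : Int)
        tpsl := c.tpsl + (l.countP (fun e => isTpSlClose (getKind e)) : Int)
        opens := c.opens + (l.countP (fun e => isEntryKind (getKind e)) : Int)
        closes := c.closes + (l.countP (fun e => isCloseKind (getKind e)) : Int) } := by
  induction l with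
  | nil => intro c; simp
  | cons e l ih =>
    intro c
    rw [List.foldl_cons, ih]
    simp only [bStep, List.countP_cons, LiveCounters.mk.injEq]
    refine ⟨?_, ?_, ?_, ?_, ?_, ?_⟩ <;> (split_ifs <;> omega)

-- ===== VERDICT (by name: the statement is the Claim_ definition above) =====
theorem build_live_summary_py_spec : Claim_equal_build_live_summary_py := by
  intro events _
  unfold Spec_build_live_summary_py build_live_summary_py build_live_summary_py_alt
  rw [bStep_foldl]
  simp [List.countP_map, Function.comp_def]
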